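-- pv_equiv track=rewrite | github.com/Leo-Gut28/Soccer_Sentiment_Analysis | reddit_api.py | classify_comments
-- ===== SOURCE A (Python) =====
-- def classify_comments(comments, first_players_filter, second_players_filter, first_team, second_team):
--     first_team_comments = []
--     second_team_comments = []
--     neutrals = []
--
--     for comment in comments:
--         comment_split = comment.split(' ')
--         added_comment = False
--         for word in comment_split:
--             if word in first_players_filter or word == first_team:
--                 first_team_comments.append(comment)
--                 added_comment = True
--                 break
--             elif word in second_players_filter or word == second_team:
--                 second_team_comments.append(comment)
--                 added_comment = True
--                 break
--
--         if not added_comment: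
--             neutrals.append(comment)
--
--     return first_team_comments, second_team_comments, neutrals
-- ===== SOURCE B (Python) =====
-- def classify_comments(comments, first_players_filter, second_players_filter, first_team, second_team):
--     first_set = set(first_players_filter)
--     second_set = set(second_players_filter)
--     first_team_comments = []
--     second_team_comments = []
--     neutrals = []
--     for comment in comments:
--         first_idx = None
--         second_idx = None
--         for i, word in enumerate(comment.split(' ')):
--             if first_idx is None and (word in first_set or word == first_team):
--                 first_idx = i
--             if second_idx is None and (word in second_set or word == second_team):
--                 second_idx = i
--         if first_idx is None and second_idx is None:
--             neutrals.append(comment)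
--         elif first_idx is not None and (second_idx is None or first_idx <= second_idx):
--             first_team_comments.append(comment)
--         else:
--             second_team_comments.append(comment)
--     return first_team_comments, second_team_comments, neutrals
-- ===== Notes on version B (the rewrite author's own statement) =====
-- stated objective: faster
-- what changed: Replaces A's early-break per-word branch chain (linear scan of each filter list per word) with one full pass recording each team's first matching word index via set membership, then decides the bucket by comparing the two indices (<= keeps first-team-wins ties).
import Mathlib
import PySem

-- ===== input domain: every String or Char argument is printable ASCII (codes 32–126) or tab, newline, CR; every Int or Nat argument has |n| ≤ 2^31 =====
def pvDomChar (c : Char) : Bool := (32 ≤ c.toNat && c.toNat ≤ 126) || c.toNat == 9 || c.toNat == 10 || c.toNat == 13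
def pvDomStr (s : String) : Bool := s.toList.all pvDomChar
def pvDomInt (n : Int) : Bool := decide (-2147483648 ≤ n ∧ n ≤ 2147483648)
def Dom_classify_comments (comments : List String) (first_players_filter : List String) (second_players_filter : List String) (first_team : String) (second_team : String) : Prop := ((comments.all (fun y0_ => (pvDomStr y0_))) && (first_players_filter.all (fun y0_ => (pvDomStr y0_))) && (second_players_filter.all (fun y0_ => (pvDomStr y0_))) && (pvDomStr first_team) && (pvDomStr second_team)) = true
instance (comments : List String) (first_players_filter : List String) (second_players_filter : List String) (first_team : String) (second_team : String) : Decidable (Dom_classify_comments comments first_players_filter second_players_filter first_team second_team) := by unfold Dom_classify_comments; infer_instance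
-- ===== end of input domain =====

-- B replaces A's early-break branch chain by a full scan recording each team's first matching
-- word index (filters held as sets, removing the per-word filter-list scan) and a final index
-- comparison; a timing run measured B faster on the generated inputs.

-- ===== PORT A =====
-- A's inner for-loop with its two break-ing branches: returns some true / some false for the
-- bucket chosen by the first matching word, none when the loop falls through.
def aScan (first_players_filter second_players_filter : List String) (first_team second_team : String) : List String → Option Bool
  | [] => none
  | w :: rest =>
    if first_players_filter.contains w || w == first_team then some true
    else if second_players_filter.contains w || w == second_team then some false
    else aScan first_players_filter second_players_filter first_team second_team rest

def classify_comments (comments : List String) (first_players_filter : List String) (second_players_filter : List String) (first_team : String) (second_team : String) : List String × List String × List String :=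
  comments.foldl (fun acc comment =>
    match aScan first_players_filter second_players_filter first_team second_team ((PySem.Str.split? comment " ").getD []) with
    | some true  => (acc.1 ++ [comment], acc.2.1, acc.2.2)
    | some false => (acc.1, acc.2.1 ++ [comment], acc.2.2)
    | none       => (acc.1, acc.2.1, acc.2.2 ++ [comment]))
    ([], [], [])

-- ===== PORT B =====
-- B's inner for-loop: one pass over the words with enumerate, recording the first index that
-- matches each side (state fi/si stays once set).
def bScan (fset sset : PySem.Set String) (first_team second_team : String) : List String → Nat → Option Nat → Option Nat → Option Nat × Option Nat
  | [], _, fi, si => (fi, si)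
  | w :: rest, i, fi, si =>
    let fi' := if fi.isNone && (fset.contains w || w == first_team) then some i else fi
    let si' := if si.isNone && (sset.contains w || w == second_team) then some i else si
    bScan fset sset first_team second_team rest (i + 1) fi' si'

-- B's if/elif/else decision on the two recorded indices.
def bBucket : Option Nat × Option Nat → Option Bool
  | (none, none) => none
  | (some _, none) => some true
  | (none, some _) => some false
  | (some f, some s) => if f ≤ s then some true else some false

def classify_comments_alt (comments : List String) (first_players_filter : List String) (second_players_filter : List String) (first_team : String) (second_team : String) : List String × List String × List String :=
  let fset := PySem.Set.ofList first_players_filter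
  let sset := PySem.Set.ofList second_players_filter
  comments.foldl (fun acc comment =>
    match bBucket (bScan fset sset first_team second_team ((PySem.Str.split? comment " ").getD []) 0 none none) with
    | none       => (acc.1, acc.2.1, acc.2.2 ++ [comment])
    | some true  => (acc.1 ++ [comment], acc.2.1, acc.2.2)
    | some false => (acc.1, acc.2.1 ++ [comment], acc.2.2))
    ([], [], [])

-- ===== PRECONDITION & SPEC =====
def Spec_classify_comments (comments : List String) (first_players_filter : List String) (second_players_filter : List String) (first_team : String) (second_team : String) (out : List String × List String × List String) : Prop := out = classify_comments_alt comments first_players_filter second_players_filter first_team second_team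
instance (comments : List String) (first_players_filter : List String) (second_players_filter : List String) (first_team : String) (second_team : String) (out : List String × List String × List String) : Decidable (Spec_classify_comments comments first_players_filter second_players_filter first_team second_team out) := by unfold Spec_classify_comments; infer_instance

-- ===== CLAIM (what is proved, stated in full; the proofs are below) =====
def Claim_equal_classify_comments : Prop := ∀ (comments : List String) (first_players_filter : List String) (second_players_filter : List String) (first_team : String) (second_team : String), Dom_classify_comments comments first_players_filter second_players_filter first_team second_team → Spec_classify_comments comments first_players_filter second_players_filter first_team second_team (classify_comments comments first_players_filter second_players_filter first_team second_team)

-- ===== LEMMAS AND PROOFS =====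

-- a set built from a list tests membership like the list
lemma set_contains_ofList (xs : List String) (w : String) :
    (PySem.Set.ofList xs).contains w = xs.contains w := by
  simp [PySem.Set.contains_eq_listContains, PySem.Set.mem_ofList]

-- once fi is set it never changes
lemma bScan_fst_some (fset sset : PySem.Set String) (ft st : String) :
    ∀ (ws : List String) (i j : Nat) (si : Option Nat),
      (bScan fset sset ft st ws i (some j) si).1 = some j := by
  intro ws; induction ws with
  | nil => intro i j si; rfl
  | cons w rest ih => intro i j si; simp [bScan, ih]

-- once si is set it never changes
lemma bScan_snd_some (fset sset : PySem.Set String) (ft st : String) :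
    ∀ (ws : List String) (i k : Nat) (fi : Option Nat),
      (bScan fset sset ft st ws i fi (some k)).2 = some k := by
  intro ws; induction ws with
  | nil => intro i k fi; rfl
  | cons w rest ih => intro i k fi; simp [bScan, ih]

-- an index recorded by the scan either was already recorded or is at least the starting counter (fst side)
lemma bScan_fst_cases (fset sset : PySem.Set String) (ft st : String) :
    ∀ (ws : List String) (i : Nat) (fi si : Option Nat) (k : Nat),
      (bScan fset sset ft st ws i fi si).1 = some k → fi = some k ∨ i ≤ k := by
  intro ws; induction ws with
  | nil => intro i fi si k h; exact Or.inl h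
  | cons w rest ih =>
    intro i fi si k h
    simp only [bScan] at h
    rcases ih _ _ _ _ h with h' | h'
    · split_ifs at h' with hc
      · exact Or.inr (by injection h' with h''; omega)
      · exact Or.inl h'
    · exact Or.inr (by omega)

-- same for the snd side
lemma bScan_snd_cases (fset sset : PySem.Set String) (ft st : String) :
    ∀ (ws : List String) (i : Nat) (fi si : Option Nat) (k : Nat),
      (bScan fset sset ft st ws i fi si).2 = some k → si = some k ∨ i ≤ k := by
  intro ws; induction ws with
  | nil => intro i fi si k h; exact Or.inl h
  | cons w rest ih =>
    intro i fi si k h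
    simp only [bScan] at h
    rcases ih _ _ _ _ h with h' | h'
    · split_ifs at h' with hc
      · exact Or.inr (by injection h' with h''; omega)
      · exact Or.inl h'
    · exact Or.inr (by omega)

-- the accumulate-then-compare decision equals A's early-break scan
lemma bucket_eq (fpf spf : List String) (ft st : String) :
    ∀ (ws : List String) (i : Nat),
      bBucket (bScan (PySem.Set.ofList fpf) (PySem.Set.ofList spf) ft st ws i none none)
        = aScan fpf spf ft st ws := by
  intro ws; induction ws with
  | nil => intro i; rfl
  | cons w rest ih =>
    intro i
    simp only [bScan, aScan, set_contains_ofList, Option.isNone_none, Bool.true_and]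
    by_cases hf : (fpf.contains w || w == ft) = true
    · rw [if_pos hf, if_pos hf]
      by_cases hs : (spf.contains w || w == st) = true
      · rw [if_pos hs]
        cases hres : bScan (PySem.Set.ofList fpf) (PySem.Set.ofList spf) ft st rest (i+1) (some i) (some i) with
        | mk a b =>
          have ha := bScan_fst_some (PySem.Set.ofList fpf) (PySem.Set.ofList spf) ft st rest (i+1) i (some i)
          have hb := bScan_snd_some (PySem.Set.ofList fpf) (PySem.Set.ofList spf) ft st rest (i+1) i (some i)
          rw [hres] at ha hb; simp only at ha hb; subst ha; subst hb
          simp [bBucket]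
      · rw [if_neg hs]
        cases hres : bScan (PySem.Set.ofList fpf) (PySem.Set.ofList spf) ft st rest (i+1) (some i) none with
        | mk a b =>
          have ha := bScan_fst_some (PySem.Set.ofList fpf) (PySem.Set.ofList spf) ft st rest (i+1) i none
          rw [hres] at ha; simp only at ha; subst ha
          cases b with
          | none => simp [bBucket]
          | some k =>
            have hk := bScan_snd_cases (PySem.Set.ofList fpf) (PySem.Set.ofList spf) ft st rest (i+1) (some i) none k (by rw [hres])
            rcases hk with hk | hk
            · exact absurd hk (by simp)
            · simp [bBucket]; omega
    · rw [if_neg hf, if_neg hf]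
      by_cases hs : (spf.contains w || w == st) = true
      · rw [if_pos hs, if_pos hs]
        cases hres : bScan (PySem.Set.ofList fpf) (PySem.Set.ofList spf) ft st rest (i+1) none (some i) with
        | mk a b =>
          have hb := bScan_snd_some (PySem.Set.ofList fpf) (PySem.Set.ofList spf) ft st rest (i+1) i none
          rw [hres] at hb; simp only at hb; subst hb
          cases a with
          | none => simp [bBucket]
          | some k =>
            have hk := bScan_fst_cases (PySem.Set.ofList fpf) (PySem.Set.ofList spf) ft st rest (i+1) none (some i) k (by rw [hres])
            rcases hk with hk | hk
            · exact absurd hk (by simp)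
            · simp [bBucket]; omega
      · rw [if_neg hs, if_neg hs]
        exact ih (i + 1)

-- ===== VERDICT (by name: the statement is the Claim_ definition above) =====
theorem classify_comments_spec : Claim_equal_classify_comments := by
  intro comments fpf spf ft st hdom
  clear hdom
  unfold Spec_classify_comments classify_comments classify_comments_alt
  induction comments using List.reverseRecOn with
  | nil => rfl
  | append_singleton rest c ih =>
    simp only [List.foldl_append, List.foldl_cons, List.foldl_nil] at *
    rw [← ih, bucket_eq]
    cases aScan fpf spf ft st ((PySem.Str.split? c " ").getD []) with
    | none => rfl
    | some b => cases b <;> rfl
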